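-- pv_equiv track=rewrite | github.com/zhentingqi/scylla | modules/Task.py | has_unique_longest_common_subarray
-- ===== SOURCE A (Python) =====
-- from typing import List, Dict, Optional, final, Tuple, Union
--
-- def has_unique_longest_common_subarray(input: Tuple[List[int], List[int]]) -> bool:
--     nums1, nums2 = input
--     m, n = len(nums1), len(nums2)
--
--     dp = [[0] * (n + 1) for _ in range(m + 1)]
--
--     max_length = 0
--     subarrays = set()
--
--     # Fill the DP table and track all longest common subarrays
--     for i in range(1, m + 1):
--         for j in range(1, n + 1):
--             if nums1[i - 1] == nums2[j - 1]:
--                 dp[i][j] = dp[i - 1][j - 1] + 1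
--                 if dp[i][j] > max_length:
--                     max_length = dp[i][j]
--                     subarrays = {tuple(nums1[i - max_length : i])}
--                 elif dp[i][j] == max_length:
--                     subarrays.add(tuple(nums1[i - max_length : i]))
--             else:
--                 dp[i][j] = 0
--
--     # Determine if there is exactly one unique longest common subarray
--     return len(subarrays) == 1
-- ===== SOURCE B (Python) =====
-- def has_unique_longest_common_subarray(input):
--     nums1, nums2 = input
--
--     def common(L):
--         w1 = {tuple(nums1[k:k + L]) for k in range(len(nums1) - L + 1)}
--         w2 = {tuple(nums2[k:k + L]) for k in range(len(nums2) - L + 1)}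
--         return w1 & w2
--
--     lo, hi = 0, min(len(nums1), len(nums2))
--     while lo < hi:
--         mid = (lo + hi + 1) // 2
--         if common(mid):
--             lo = mid
--         else:
--             hi = mid - 1
--     return lo > 0 and len(common(lo)) == 1
-- ===== Notes on version B (the rewrite author's own statement) =====
-- stated objective: faster
-- what changed: B abandons the DP entirely: it binary-searches the maximal length L at which the sets of length-L windows of the two lists intersect (windows built as hashed tuple sets, intersection via set &), then answers whether that intersection at the maximal L has exactly one element; A fills an (m+1)x(n+1) DP table and maintains a set of longest subarrays per matching cell.
import Mathlib
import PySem

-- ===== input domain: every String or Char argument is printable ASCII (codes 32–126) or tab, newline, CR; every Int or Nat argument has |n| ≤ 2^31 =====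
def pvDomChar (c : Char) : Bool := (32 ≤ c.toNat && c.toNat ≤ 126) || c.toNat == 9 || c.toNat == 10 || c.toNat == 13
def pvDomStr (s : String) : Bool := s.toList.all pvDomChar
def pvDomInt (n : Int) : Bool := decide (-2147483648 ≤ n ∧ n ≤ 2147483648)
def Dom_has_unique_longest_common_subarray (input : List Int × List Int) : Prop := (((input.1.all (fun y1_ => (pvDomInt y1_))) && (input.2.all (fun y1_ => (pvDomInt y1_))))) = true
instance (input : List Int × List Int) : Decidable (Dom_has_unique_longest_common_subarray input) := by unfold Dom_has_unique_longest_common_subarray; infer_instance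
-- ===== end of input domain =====

-- B drops the DP: it binary-searches the largest L whose length-L window sets of the two
-- lists intersect, then tests whether that intersection is a singleton (faster: a timing run measured it; return value identical).

-- ===== PORT A =====
def has_unique_longest_common_subarray (input : List Int × List Int) : Bool :=
  let nums1 := input.1
  let nums2 := input.2
  let m := nums1.length
  let n := nums2.length
  -- dp = [[0] * (n + 1) for _ in range(m + 1)]
  let dp0 : List (List Int) := (List.range (m + 1)).map (fun _ => List.replicate (n + 1) (0 : Int))
  -- for i in range(1, m + 1): for j in range(1, n + 1): …
  let fin :=
    (PySem.List.pyRange 1 ((m : Int) + 1)).foldl (fun st i =>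
      (PySem.List.pyRange 1 ((n : Int) + 1)).foldl (fun st j =>
        if PySem.List.pyGetD nums1 (i - 1) 0 == PySem.List.pyGetD nums2 (j - 1) 0 then
          -- dp[i][j] = dp[i-1][j-1] + 1
          let v := PySem.List.pyGetD (PySem.List.pyGetD st.1 (i - 1) []) (j - 1) 0 + 1
          let dp' := PySem.List.pySetD st.1 i (PySem.List.pySetD (PySem.List.pyGetD st.1 i []) j v)
          if v > st.2.1 then
            (dp', v, PySem.Set.ofList [PySem.List.slice nums1 (some (i - v)) (some i)])
          else if v == st.2.1 then
            (dp', st.2.1, PySem.Set.add st.2.2 (PySem.List.slice nums1 (some (i - st.2.1)) (some i)))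
          else
            (dp', st.2.1, st.2.2)
        else
          -- dp[i][j] = 0
          (PySem.List.pySetD st.1 i (PySem.List.pySetD (PySem.List.pyGetD st.1 i []) j (0 : Int)), st.2.1, st.2.2)) st)
      (dp0, (0 : Int), ([] : PySem.Set (List Int)))
  fin.2.2.length == 1

-- ===== PORT B =====
-- w = {tuple(xs[k:k+L]) for k in range(len(xs)-L+1)}
def pvWin (xs : List Int) (L : Int) : PySem.Set (List Int) :=
  PySem.Set.ofList ((PySem.List.pyRange 0 ((xs.length : Int) - L + 1)).map
    (fun k => PySem.List.slice xs (some k) (some (k + L))))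

-- common(L) = w1 & w2
def pvCommon (a b : List Int) (L : Int) : PySem.Set (List Int) :=
  PySem.Set.inter (pvWin a L) (pvWin b L)

-- while lo < hi: mid = (lo+hi+1)//2; if common(mid): lo = mid else: hi = mid - 1
-- (structural recursion on a fuel counter ≥ the number of iterations; each pass shrinks hi - lo)
def pvBSearchGo (a b : List Int) : Nat → Int → Int → Int
  | 0, lo, _ => lo
  | fuel + 1, lo, hi =>
    if lo < hi then
      if pvCommon a b (PySem.Int.floordiv (lo + hi + 1) 2) ≠ [] then
        pvBSearchGo a b fuel (PySem.Int.floordiv (lo + hi + 1) 2) hi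
      else
        pvBSearchGo a b fuel lo (PySem.Int.floordiv (lo + hi + 1) 2 - 1)
    else lo

def pvBSearch (a b : List Int) (lo hi : Int) : Int :=
  pvBSearchGo a b (hi - lo).toNat lo hi

def has_unique_longest_common_subarray_alt (input : List Int × List Int) : Bool :=
  let nums1 := input.1
  let nums2 := input.2
  let lo := pvBSearch nums1 nums2 0 (min (nums1.length : Int) (nums2.length : Int))
  decide (lo > 0) && ((pvCommon nums1 nums2 lo).length == 1)

-- ===== PRECONDITION & SPEC =====
def Spec_has_unique_longest_common_subarray (input : List Int × List Int) (out : Bool) : Prop := out = has_unique_longest_common_subarray_alt input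
instance (input : List Int × List Int) (out : Bool) : Decidable (Spec_has_unique_longest_common_subarray input out) := by unfold Spec_has_unique_longest_common_subarray; infer_instance

-- ===== CLAIM (what is proved, stated in full; the proofs are below) =====
def Claim_equal_has_unique_longest_common_subarray : Prop := ∀ (input : List Int × List Int), Dom_has_unique_longest_common_subarray input → Spec_has_unique_longest_common_subarray input (has_unique_longest_common_subarray input)

-- ===== LEMMAS AND PROOFS =====

-- ---------- machinery characterising port A's nested fold (rolling row) ----------

def pvNextRow (x : Int) (b cur : List Int) : List Int :=
  (0 : Int) :: (PySem.List.enumerate b).map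
    (fun q => if x == q.2 then PySem.List.pyGetD cur q.1 0 + 1 else 0)

def pvCell (a : List Int) (i : Int) (s : Int × PySem.Set (List Int)) (v : Int) : Int × PySem.Set (List Int) :=
  if 0 < v then
    if v > s.1 then (v, PySem.Set.ofList [PySem.List.slice a (some (i - v)) (some i)])
    else if v = s.1 then (s.1, PySem.Set.add s.2 (PySem.List.slice a (some (i - s.1)) (some i)))
    else s
  else s

-- the rolling-row fold: one row, the running maximum, the end positions of maximal matches
def pvRollStep (a b : List Int) (st : List Int × Int × List Int) (i : Int) : List Int × Int × List Int :=
  if (PySem.List.max?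
        ((0:Int) ::
          List.map
            (fun q => if (PySem.List.pyGetD a (i - 1) 0 == q.2) = true then PySem.List.pyGetD st.1 q.1 0 + 1 else 0)
            (PySem.List.enumerate b))
        (fun v => v)).getD 0 > st.2.1 then
    ((0:Int) ::
        List.map
          (fun q => if (PySem.List.pyGetD a (i - 1) 0 == q.2) = true then PySem.List.pyGetD st.1 q.1 0 + 1 else 0)
          (PySem.List.enumerate b),
      (PySem.List.max?
        ((0:Int) ::
          List.map
            (fun q => if (PySem.List.pyGetD a (i - 1) 0 == q.2) = true then PySem.List.pyGetD st.1 q.1 0 + 1 else 0)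
            (PySem.List.enumerate b))
        (fun v => v)).getD 0,
      [i])
  else
    if ((PySem.List.max?
          ((0:Int) ::
            List.map
              (fun q => if (PySem.List.pyGetD a (i - 1) 0 == q.2) = true then PySem.List.pyGetD st.1 q.1 0 + 1 else 0)
              (PySem.List.enumerate b))
          (fun v => v)).getD 0 == st.2.1 &&
        decide ((PySem.List.max?
          ((0:Int) ::
            List.map
              (fun q => if (PySem.List.pyGetD a (i - 1) 0 == q.2) = true then PySem.List.pyGetD st.1 q.1 0 + 1 else 0)
              (PySem.List.enumerate b))
          (fun v => v)).getD 0 > 0)) = true then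
      ((0:Int) ::
          List.map
            (fun q => if (PySem.List.pyGetD a (i - 1) 0 == q.2) = true then PySem.List.pyGetD st.1 q.1 0 + 1 else 0)
            (PySem.List.enumerate b),
        st.2.1, st.2.2 ++ [i])
    else
      ((0:Int) ::
          List.map
            (fun q => if (PySem.List.pyGetD a (i - 1) 0 == q.2) = true then PySem.List.pyGetD st.1 q.1 0 + 1 else 0)
            (PySem.List.enumerate b),
        st.2.1, st.2.2)

def pvRoll (a b : List Int) : List Int × Int × List Int :=
  (PySem.List.pyRange 1 ((a.length : Int) + 1)).foldl (pvRollStep a b)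
    (List.replicate (b.length + 1) 0, (0 : Int), ([] : List Int))

theorem pvFoldlMaxInit (vs : List Int) : ∀ (c v : Int), vs.foldl max (max c v) = max v (vs.foldl max c) := by
  induction vs with
  | nil => intro c v; simp [max_comm]
  | cons w t ih =>
    intro c v
    simp only [List.foldl_cons]
    rw [show max (max c v) w = max (max c w) v by
      rw [max_assoc, max_comm v w, ← max_assoc], ih]

theorem pvCell_fold (a : List Int) (i : Int) (vs : List Int) :
    ∀ (mx : Int) (sb : PySem.Set (List Int)), 0 ≤ mx →
    vs.foldl (pvCell a i) (mx, sb) =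
      (if vs.foldl max 0 > mx then
        (vs.foldl max 0, PySem.Set.ofList [PySem.List.slice a (some (i - vs.foldl max 0)) (some i)])
      else if vs.foldl max 0 = mx ∧ 0 < mx then
        (mx, PySem.Set.add sb (PySem.List.slice a (some (i - mx)) (some i)))
      else (mx, sb)) := by
  induction vs with
  | nil =>
    intro mx sb hmx
    simp only [List.foldl_nil]
    rw [if_neg (by omega), if_neg (by omega)]
  | cons v t ih =>
    intro mx sb hmx
    have hr' : 0 ≤ t.foldl max 0 := (PySem.List.le_foldl_max t 0).1
    simp only [List.foldl_cons, pvFoldlMaxInit t 0 v]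
    have hself : ∀ (s : PySem.Set (List Int)) (x : List Int),
        PySem.Set.add (PySem.Set.add s x) x = PySem.Set.add s x :=
      fun s x => PySem.Set.add_of_mem (by simp [PySem.Set.mem_add])
    have hsing : ∀ x : List Int, PySem.Set.add (PySem.Set.ofList [x]) x = PySem.Set.ofList [x] :=
      fun x => PySem.Set.add_of_mem (by simp [PySem.Set.mem_ofList])
    by_cases hv : 0 < v
    · by_cases hvmx : v > mx
      · simp only [pvCell, if_pos hv, if_pos hvmx]
        rw [ih v _ (by omega)]
        rcases le_total v (t.foldl max 0) with hle | hle
        · rw [max_eq_right hle]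
          split_ifs <;> first | rfl | omega | (simp_all [hsing, hself])
        · rw [max_eq_left hle]
          split_ifs <;> first | rfl | omega | (simp_all [hsing, hself])
      · by_cases hveq : v = mx
        · simp only [pvCell, if_pos hv, if_neg hvmx, if_pos hveq]
          rw [ih mx _ hmx]
          subst hveq
          rcases le_total v (t.foldl max 0) with hle | hle
          · rw [max_eq_right hle]
            split_ifs <;> first | rfl | omega | (simp_all [hsing, hself])
          · rw [max_eq_left hle]
            split_ifs <;> first | rfl | omega | (simp_all [hsing, hself])
        · simp only [pvCell, if_pos hv, if_neg hvmx, if_neg hveq]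
          rw [ih mx _ hmx]
          rcases le_total v (t.foldl max 0) with hle | hle
          · rw [max_eq_right hle]
          · rw [max_eq_left hle]
            split_ifs <;> first | rfl | omega | (simp_all [hsing, hself])
    · simp only [pvCell, if_neg hv]
      rw [ih mx _ hmx]
      rw [show max v (t.foldl max 0) = t.foldl max 0 by omega]

theorem pvNextRow_length (x : Int) (b cur : List Int) :
    (pvNextRow x b cur).length = b.length + 1 := by
  simp [pvNextRow, PySem.List.length_enumerate]

theorem pvGetD_nonneg (xs : List Int) (j : Int) (h : ∀ w ∈ xs, 0 ≤ w) :
    0 ≤ PySem.List.pyGetD xs j 0 := by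
  unfold PySem.List.pyGetD
  cases hg : PySem.List.pyGet? xs j with
  | none => simp
  | some w => exact h w (PySem.List.mem_of_pyGet?_eq_some xs hg)

theorem pvNextRow_nonneg (x : Int) (b cur : List Int) (hcur : ∀ w ∈ cur, 0 ≤ w) :
    ∀ w ∈ pvNextRow x b cur, 0 ≤ w := by
  intro w hw
  rcases List.mem_cons.1 hw with h | h
  · omega
  · rcases List.mem_map.1 h with ⟨q, _, rfl⟩
    split
    · have := pvGetD_nonneg cur q.1 hcur; omega
    · omega

theorem pvEnumShift (a : List Int) : ∀ s : Int,
    PySem.List.enumerate a s =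
      (PySem.List.pyRange s (s + (a.length : Int))).map (fun i => (i, PySem.List.pyGetD a (i - s) 0)) := by
  induction a with
  | nil =>
    intro s
    rw [show ((List.length ([] : List Int) : Int)) = 0 from rfl]
    rw [PySem.List.pyRange_one_eq_nil (by omega)]
    rfl
  | cons x t ih =>
    intro s
    rw [show PySem.List.enumerate (x :: t) s = (s, x) :: PySem.List.enumerate t (s+1) from rfl]
    rw [PySem.List.pyRange_one_cons (by simp only [List.length_cons]; push_cast; omega)]
    rw [List.map_cons]
    have hhead : PySem.List.pyGetD (x :: t) (s - s) 0 = x := by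
      rw [show s - s = (0:Int) by omega, PySem.List.pyGetD_of_nonneg _ _ (by omega)]
      simp
    rw [hhead, ih (s+1)]
    rw [show s + ((x :: t).length : Int) = (s + 1) + (t.length : Int) by simp only [List.length_cons]; push_cast; omega]
    apply congrArg
    apply List.map_congr_left
    intro i hi
    rw [PySem.List.mem_pyRange_one] at hi
    have h2 : PySem.List.pyGetD (x :: t) (i - s) 0 = PySem.List.pyGetD t (i - (s+1)) 0 := by
      rw [PySem.List.pyGetD_of_nonneg _ _ (by omega), PySem.List.pyGetD_of_nonneg _ _ (by omega)]
      rw [show (i - s).toNat = (i - (s+1)).toNat + 1 by omega]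
      simp
    rw [h2]

theorem pvNextRow_get (x : Int) (b cur : List Int) (tn : Nat) (h1 : 1 ≤ tn) (h2 : tn < b.length + 1) :
    (pvNextRow x b cur)[tn]'(by rw [pvNextRow_length]; omega) =
      if x == PySem.List.pyGetD b ((tn : Int) - 1) 0 then PySem.List.pyGetD cur ((tn : Int) - 1) 0 + 1 else 0 := by
  obtain ⟨sn, rfl⟩ : ∃ sn, tn = sn + 1 := ⟨tn - 1, by omega⟩
  have he := pvEnumShift b 0
  have hc : ((sn + 1 : Nat) : Int) - 1 = ((sn : Nat) : Int) := by push_cast; omega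
  simp only [pvNextRow, List.getElem_cons_succ, he, List.map_map, List.getElem_map,
    PySem.List.getElem_pyRange_one, Function.comp, hc]
  norm_num

theorem pvSetPartial {α : Type} (l : List α) (d : α) (tn : Nat) (h : tn < l.length) :
    (l.take tn ++ List.replicate (l.length - tn) d).set tn (l[tn]) =
      l.take (tn + 1) ++ List.replicate (l.length - (tn + 1)) d := by
  rw [List.set_append]
  rw [List.length_take]
  rw [if_neg (by omega)]
  rw [show l.length - tn = (l.length - (tn+1)) + 1 by omega, List.replicate_succ]
  rw [show tn - min tn l.length = 0 by omega]
  rw [List.set_cons_zero]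
  rw [List.take_add_one, List.getElem?_eq_getElem h]
  simp only [Option.toList_some, List.append_assoc, List.singleton_append]

theorem pvInnerA (a b : List Int) (i : Int) (hi : 1 ≤ i) (prev : List Int)
    (hprev : ∀ w ∈ prev, (0:Int) ≤ w) :
    ∀ (k : Nat), ∀ (t : Int), t = (b.length : Int) + 1 - (k : Int) → 1 ≤ t →
    ∀ (dp : List (List Int)) (mx : Int) (sb : PySem.Set (List Int)),
      i.toNat < dp.length →
      PySem.List.pyGetD dp (i-1) [] = prev →
      PySem.List.pyGetD dp i [] =
        (pvNextRow (PySem.List.pyGetD a (i-1) 0) b prev).take t.toNat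
          ++ List.replicate (b.length + 1 - t.toNat) 0 →
      ∀ res, res = List.foldl
        (fun st j =>
          if (PySem.List.pyGetD a (i - 1) 0 == PySem.List.pyGetD b (j - 1) 0) = true then
            if PySem.List.pyGetD (PySem.List.pyGetD st.1 (i - 1) []) (j - 1) 0 + 1 > st.2.1 then
              (PySem.List.pySetD st.1 i
                  (PySem.List.pySetD (PySem.List.pyGetD st.1 i []) j
                    (PySem.List.pyGetD (PySem.List.pyGetD st.1 (i - 1) []) (j - 1) 0 + 1)),
                PySem.List.pyGetD (PySem.List.pyGetD st.1 (i - 1) []) (j - 1) 0 + 1,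
                PySem.Set.ofList
                  [PySem.List.slice a
                      (some (i - (PySem.List.pyGetD (PySem.List.pyGetD st.1 (i - 1) []) (j - 1) 0 + 1)))
                      (some i)])
            else
              if (PySem.List.pyGetD (PySem.List.pyGetD st.1 (i - 1) []) (j - 1) 0 + 1 == st.2.1) = true then
                (PySem.List.pySetD st.1 i
                    (PySem.List.pySetD (PySem.List.pyGetD st.1 i []) j
                      (PySem.List.pyGetD (PySem.List.pyGetD st.1 (i - 1) []) (j - 1) 0 + 1)),
                  st.2.1, st.2.2.add (PySem.List.slice a (some (i - st.2.1)) (some i)))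
              else
                (PySem.List.pySetD st.1 i
                    (PySem.List.pySetD (PySem.List.pyGetD st.1 i []) j
                      (PySem.List.pyGetD (PySem.List.pyGetD st.1 (i - 1) []) (j - 1) 0 + 1)),
                  st.2.1, st.2.2)
          else
            (PySem.List.pySetD st.1 i (PySem.List.pySetD (PySem.List.pyGetD st.1 i []) j 0), st.2.1, st.2.2))
        (dp, mx, sb) (PySem.List.pyRange t ((b.length : Int) + 1)) →
      (res.1.length = dp.length ∧
       (∀ kk : Int, 0 ≤ kk → kk ≠ i → PySem.List.pyGetD res.1 kk [] = PySem.List.pyGetD dp kk []) ∧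
       PySem.List.pyGetD res.1 i [] = pvNextRow (PySem.List.pyGetD a (i-1) 0) b prev ∧
       res.2 = List.foldl (pvCell a i) (mx, sb)
         ((pvNextRow (PySem.List.pyGetD a (i-1) 0) b prev).drop t.toNat)) := by
  intro k
  induction k with
  | zero =>
    intro t ht ht1 dp mx sb hilen hprevrow hrowpart res hres
    have htb : t = (b.length : Int) + 1 := by omega
    rw [PySem.List.pyRange_one_eq_nil (by omega)] at hres
    simp only [List.foldl_nil] at hres
    subst hres
    have hrl : (pvNextRow (PySem.List.pyGetD a (i-1) 0) b prev).length = b.length + 1 :=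
      pvNextRow_length _ _ _
    have htn : t.toNat = b.length + 1 := by omega
    refine ⟨rfl, fun kk _ _ => rfl, ?_, ?_⟩
    · rw [hrowpart, htn, List.take_of_length_le (by omega), show b.length + 1 - (b.length + 1) = 0 by omega]
      simp
    · rw [htn, List.drop_of_length_le (by omega)]
      rfl
  | succ k ih =>
    intro t ht ht1 dp mx sb hilen hprevrow hrowpart res hres
    have htle : t ≤ (b.length : Int) := by omega
    set x := PySem.List.pyGetD a (i-1) 0 with hx
    set row := pvNextRow x b prev with hrow
    have hrl : row.length = b.length + 1 := pvNextRow_length _ _ _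
    have htn : t.toNat < b.length + 1 := by omega
    have htc : ((t.toNat : Int)) = t := by omega
    have ht1n : 1 ≤ t.toNat := by omega
    have hget : row[t.toNat]'(by omega) =
        if x == PySem.List.pyGetD b ((t.toNat : Int) - 1) 0 then PySem.List.pyGetD prev ((t.toNat : Int) - 1) 0 + 1 else 0 :=
      pvNextRow_get x b prev t.toNat ht1n htn
    rw [htc] at hget
    have hvnn : 0 ≤ PySem.List.pyGetD prev (t - 1) 0 := pvGetD_nonneg _ _ hprev
    rw [PySem.List.pyRange_one_cons (by omega)] at hres
    simp only [List.foldl_cons] at hres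
    have hsetrow : ∀ w : Int, w = row[t.toNat]'(by omega) →
        PySem.List.pySetD (PySem.List.pyGetD dp i []) t w =
          row.take (t.toNat + 1) ++ List.replicate (b.length + 1 - (t.toNat + 1)) 0 := by
      intro w hw
      rw [hrowpart, PySem.List.pySetD_of_nonneg _ _ (by omega), hw]
      have h2 := pvSetPartial row (0:Int) t.toNat (by omega)
      simp only [hrl] at h2
      exact h2
    have hdpfacts : ∀ (R : List Int),
        (PySem.List.pySetD dp i R).length = dp.length ∧
        (∀ kk : Int, 0 ≤ kk → kk ≠ i → PySem.List.pyGetD (PySem.List.pySetD dp i R) kk [] = PySem.List.pyGetD dp kk []) ∧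
        PySem.List.pyGetD (PySem.List.pySetD dp i R) i [] = R := by
      intro R
      refine ⟨PySem.List.length_pySetD _ _ _, ?_, ?_⟩
      · intro kk hkk0 hkki
        rw [PySem.List.pySetD_of_nonneg _ _ (by omega)]
        rw [PySem.List.pyGetD_of_nonneg _ _ hkk0, PySem.List.pyGetD_of_nonneg _ _ hkk0]
        have : kk.toNat ≠ i.toNat := by omega
        rw [List.getD, List.getD, List.getElem?_set_ne (by omega)]
      · rw [PySem.List.pySetD_of_nonneg _ _ (by omega), PySem.List.pyGetD_of_nonneg _ _ (by omega)]
        rw [List.getD, List.getElem?_set_self (by omega)]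
        rfl
    have hdrop : row.drop t.toNat = row[t.toNat]'(by omega) :: row.drop (t.toNat + 1) :=
      List.drop_eq_getElem_cons (by omega)
    by_cases hc : (x == PySem.List.pyGetD b (t - 1) 0) = true
    · have hv : row[t.toNat]'(by omega) = PySem.List.pyGetD prev (t - 1) 0 + 1 := by
        rw [hget, if_pos hc]
      have hv0 : 0 < PySem.List.pyGetD prev (t - 1) 0 + 1 := by omega
      rw [if_pos hc] at hres
      rw [hprevrow] at hres
      have hstep : ∀ mx' sb',
          (if PySem.List.pyGetD prev (t - 1) 0 + 1 > mx' then
            (PySem.List.pySetD dp i (PySem.List.pySetD (PySem.List.pyGetD dp i []) t (PySem.List.pyGetD prev (t - 1) 0 + 1)),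
              PySem.List.pyGetD prev (t - 1) 0 + 1,
              PySem.Set.ofList [PySem.List.slice a (some (i - (PySem.List.pyGetD prev (t - 1) 0 + 1))) (some i)])
          else
            if (PySem.List.pyGetD prev (t - 1) 0 + 1 == mx') = true then
              (PySem.List.pySetD dp i (PySem.List.pySetD (PySem.List.pyGetD dp i []) t (PySem.List.pyGetD prev (t - 1) 0 + 1)),
                mx', PySem.Set.add sb' (PySem.List.slice a (some (i - mx')) (some i)))
            else
              (PySem.List.pySetD dp i (PySem.List.pySetD (PySem.List.pyGetD dp i []) t (PySem.List.pyGetD prev (t - 1) 0 + 1)),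
                mx', sb')) =
          (PySem.List.pySetD dp i (PySem.List.pySetD (PySem.List.pyGetD dp i []) t (PySem.List.pyGetD prev (t - 1) 0 + 1)),
            pvCell a i (mx', sb') (row[t.toNat]'(by omega))) := by
        intro mx' sb'
        rw [hv]
        simp only [pvCell, if_pos hv0, beq_iff_eq]
        split_ifs <;> rfl
      rw [hstep mx sb] at hres
      obtain ⟨hL, hU, hSelf⟩ := hdpfacts
        (PySem.List.pySetD (PySem.List.pyGetD dp i []) t (PySem.List.pyGetD prev (t - 1) 0 + 1))
      have hRowN : PySem.List.pyGetD (PySem.List.pySetD dp i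
            (PySem.List.pySetD (PySem.List.pyGetD dp i []) t (PySem.List.pyGetD prev (t - 1) 0 + 1))) i [] =
          row.take ((t+1).toNat) ++ List.replicate (b.length + 1 - (t+1).toNat) 0 := by
        rw [hSelf, hsetrow _ hv.symm, show (t+1).toNat = t.toNat + 1 by omega]
      have hPrevN : PySem.List.pyGetD (PySem.List.pySetD dp i
            (PySem.List.pySetD (PySem.List.pyGetD dp i []) t (PySem.List.pyGetD prev (t - 1) 0 + 1))) (i-1) [] = prev := by
        rw [hU (i-1) (by omega) (by omega), hprevrow]
      obtain ⟨iL, iU, iRow, iSt⟩ := ih (t+1) (by push_cast; omega) (by omega) _ _ _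
        (by rw [hL]; exact hilen) hPrevN hRowN res hres
      refine ⟨by rw [iL, hL], ?_, iRow, ?_⟩
      · intro kk h0 hki
        rw [iU kk h0 hki, hU kk h0 hki]
      · rw [iSt, hdrop, List.foldl_cons, show (t+1).toNat = t.toNat + 1 by omega]
        simp only [Prod.mk.eta]
        rfl
    · have hv : row[t.toNat]'(by omega) = 0 := by
        rw [hget, if_neg hc]
      rw [if_neg hc] at hres
      obtain ⟨hL, hU, hSelf⟩ := hdpfacts (PySem.List.pySetD (PySem.List.pyGetD dp i []) t 0)
      have hRowN : PySem.List.pyGetD (PySem.List.pySetD dp i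
            (PySem.List.pySetD (PySem.List.pyGetD dp i []) t 0)) i [] =
          row.take ((t+1).toNat) ++ List.replicate (b.length + 1 - (t+1).toNat) 0 := by
        rw [hSelf, hsetrow 0 hv.symm, show (t+1).toNat = t.toNat + 1 by omega]
      have hPrevN : PySem.List.pyGetD (PySem.List.pySetD dp i
            (PySem.List.pySetD (PySem.List.pyGetD dp i []) t 0)) (i-1) [] = prev := by
        rw [hU (i-1) (by omega) (by omega), hprevrow]
      obtain ⟨iL, iU, iRow, iSt⟩ := ih (t+1) (by push_cast; omega) (by omega) _ _ _
        (by rw [hL]; exact hilen) hPrevN hRowN res hres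
      refine ⟨by rw [iL, hL], ?_, iRow, ?_⟩
      · intro kk h0 hki
        rw [iU kk h0 hki, hU kk h0 hki]
      · rw [iSt, hdrop, hv, List.foldl_cons, show pvCell a i (mx, sb) 0 = (mx, sb) from by simp [pvCell],
          show (t+1).toNat = t.toNat + 1 by omega]

theorem pvOuterLoop (a b : List Int) :
    ∀ (k : Nat), ∀ (t : Int), t = (a.length : Int) + 1 - (k : Int) → 1 ≤ t →
    ∀ (dp : List (List Int)) (mx : Int) (sb : PySem.Set (List Int)) (cur : List Int) (ends : List Int),
      dp.length = a.length + 1 →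
      (∀ kk : Int, t ≤ kk → kk ≤ (a.length : Int) → PySem.List.pyGetD dp kk [] = List.replicate (b.length + 1) 0) →
      PySem.List.pyGetD dp (t-1) [] = cur →
      (∀ w ∈ cur, (0:Int) ≤ w) →
      0 ≤ mx →
      sb = PySem.Set.ofList (ends.map (fun e => PySem.List.slice a (some (e - mx)) (some e))) →
      ∀ resA resB,
      resA = List.foldl
        (fun st i =>
          List.foldl
            (fun st j =>
              if (PySem.List.pyGetD a (i - 1) 0 == PySem.List.pyGetD b (j - 1) 0) = true then
                if PySem.List.pyGetD (PySem.List.pyGetD st.1 (i - 1) []) (j - 1) 0 + 1 > st.2.1 then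
                  (PySem.List.pySetD st.1 i
                      (PySem.List.pySetD (PySem.List.pyGetD st.1 i []) j
                        (PySem.List.pyGetD (PySem.List.pyGetD st.1 (i - 1) []) (j - 1) 0 + 1)),
                    PySem.List.pyGetD (PySem.List.pyGetD st.1 (i - 1) []) (j - 1) 0 + 1,
                    PySem.Set.ofList
                      [PySem.List.slice a
                          (some (i - (PySem.List.pyGetD (PySem.List.pyGetD st.1 (i - 1) []) (j - 1) 0 + 1)))
                          (some i)])
                else
                  if (PySem.List.pyGetD (PySem.List.pyGetD st.1 (i - 1) []) (j - 1) 0 + 1 == st.2.1) = true then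
                    (PySem.List.pySetD st.1 i
                        (PySem.List.pySetD (PySem.List.pyGetD st.1 i []) j
                          (PySem.List.pyGetD (PySem.List.pyGetD st.1 (i - 1) []) (j - 1) 0 + 1)),
                      st.2.1, st.2.2.add (PySem.List.slice a (some (i - st.2.1)) (some i)))
                  else
                    (PySem.List.pySetD st.1 i
                        (PySem.List.pySetD (PySem.List.pyGetD st.1 i []) j
                          (PySem.List.pyGetD (PySem.List.pyGetD st.1 (i - 1) []) (j - 1) 0 + 1)),
                      st.2.1, st.2.2)
              else
                (PySem.List.pySetD st.1 i (PySem.List.pySetD (PySem.List.pyGetD st.1 i []) j 0), st.2.1, st.2.2))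
            st (PySem.List.pyRange 1 ((b.length : Int) + 1)))
        (dp, mx, sb) (PySem.List.pyRange t ((a.length : Int) + 1)) →
      resB = List.foldl (pvRollStep a b) (cur, mx, ends) (PySem.List.pyRange t ((a.length : Int) + 1)) →
      (resA.2.1 = resB.2.1 ∧
       resA.2.2 = PySem.Set.ofList (resB.2.2.map (fun e => PySem.List.slice a (some (e - resB.2.1)) (some e)))) := by
  intro k
  induction k with
  | zero =>
    intro t ht ht1 dp mx sb cur ends hdplen hrows hcur hcurnn hmx hsb resA resB hresA hresB
    rw [PySem.List.pyRange_one_eq_nil (show (a.length : Int) + 1 ≤ t by omega)] at hresA hresB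
    simp only [List.foldl_nil] at hresA hresB
    subst hresA hresB
    exact ⟨rfl, hsb⟩
  | succ k ih =>
    intro t ht ht1 dp mx sb cur ends hdplen hrows hcur hcurnn hmx hsb resA resB hresA hresB
    have htle : t ≤ (a.length : Int) := by omega
    rw [PySem.List.pyRange_one_cons (show t < (a.length : Int) + 1 by omega)] at hresA hresB
    simp only [List.foldl_cons] at hresA hresB
    obtain ⟨iL, iU, iRow, iSt⟩ := pvInnerA a b t ht1 cur hcurnn b.length 1 (by push_cast; omega) (by omega)
      dp mx sb (by omega) hcur
      (by rw [hrows t le_rfl (by omega)]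
          rw [show (1:Int).toNat = 1 from rfl]
          rw [show (pvNextRow (PySem.List.pyGetD a (t-1) 0) b cur).take 1 = [0] from rfl]
          rw [show b.length + 1 - 1 = b.length by omega]
          rfl)
      _ rfl
    rw [show (1:Int).toNat = 1 from rfl] at iSt
    rw [show (pvNextRow (PySem.List.pyGetD a (t-1) 0) b cur).drop 1 =
        List.map (fun q => if (PySem.List.pyGetD a (t - 1) 0 == q.2) = true then PySem.List.pyGetD cur q.1 0 + 1 else 0)
          (PySem.List.enumerate b) from rfl] at iSt
    set tl := List.map (fun q => if (PySem.List.pyGetD a (t - 1) 0 == q.2) = true then PySem.List.pyGetD cur q.1 0 + 1 else 0)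
      (PySem.List.enumerate b) with htl
    rw [pvCell_fold a t tl mx sb hmx] at iSt
    have hM0 : 0 ≤ tl.foldl max 0 := (PySem.List.le_foldl_max tl 0).1
    have hmax : (PySem.List.max? ((0:Int) :: tl) (fun v => v)).getD 0 = tl.foldl max 0 := by
      rw [PySem.List.max?_id_cons]
      rfl
    have hstepB : pvRollStep a b (cur, mx, ends) t =
        (((0:Int) :: tl),
          if tl.foldl max 0 > mx then (tl.foldl max 0, ([t] : List Int))
          else if tl.foldl max 0 = mx ∧ 0 < mx then (mx, ends ++ [t])
          else (mx, ends)) := by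
      simp only [pvRollStep]
      simp only [← htl]
      rw [hmax]
      by_cases hgt : tl.foldl max 0 > mx
      · rw [if_pos hgt, if_pos hgt]
      · rw [if_neg hgt, if_neg hgt]
        by_cases heq : tl.foldl max 0 = mx ∧ 0 < mx
        · rw [if_pos (show ((tl.foldl max 0 == mx) && decide (tl.foldl max 0 > 0)) = true by
            simp only [Bool.and_eq_true, beq_iff_eq, decide_eq_true_eq]
            exact ⟨heq.1, by omega⟩), if_pos heq]
        · rw [if_neg (show ¬(((tl.foldl max 0 == mx) && decide (tl.foldl max 0 > 0)) = true) by
            simp only [Bool.and_eq_true, beq_iff_eq, decide_eq_true_eq]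
            rintro ⟨h1, h2⟩
            exact heq ⟨h1, by omega⟩), if_neg heq]
    rw [hstepB] at hresB
    have hrowB : ((0:Int) :: tl) = pvNextRow (PySem.List.pyGetD a (t-1) 0) b cur := rfl
    have hrowNN : ∀ w ∈ ((0:Int) :: tl), (0:Int) ≤ w := by
      rw [hrowB]; exact pvNextRow_nonneg _ _ _ hcurnn
    set TA := List.foldl
        (fun st j =>
          if (PySem.List.pyGetD a (t - 1) 0 == PySem.List.pyGetD b (j - 1) 0) = true then
            if PySem.List.pyGetD (PySem.List.pyGetD st.1 (t - 1) []) (j - 1) 0 + 1 > st.2.1 then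
              (PySem.List.pySetD st.1 t
                  (PySem.List.pySetD (PySem.List.pyGetD st.1 t []) j
                    (PySem.List.pyGetD (PySem.List.pyGetD st.1 (t - 1) []) (j - 1) 0 + 1)),
                PySem.List.pyGetD (PySem.List.pyGetD st.1 (t - 1) []) (j - 1) 0 + 1,
                PySem.Set.ofList
                  [PySem.List.slice a
                      (some (t - (PySem.List.pyGetD (PySem.List.pyGetD st.1 (t - 1) []) (j - 1) 0 + 1)))
                      (some t)])
            else
              if (PySem.List.pyGetD (PySem.List.pyGetD st.1 (t - 1) []) (j - 1) 0 + 1 == st.2.1) = true then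
                (PySem.List.pySetD st.1 t
                    (PySem.List.pySetD (PySem.List.pyGetD st.1 t []) j
                      (PySem.List.pyGetD (PySem.List.pyGetD st.1 (t - 1) []) (j - 1) 0 + 1)),
                  st.2.1, st.2.2.add (PySem.List.slice a (some (t - st.2.1)) (some t)))
              else
                (PySem.List.pySetD st.1 t
                    (PySem.List.pySetD (PySem.List.pyGetD st.1 t []) j
                      (PySem.List.pyGetD (PySem.List.pyGetD st.1 (t - 1) []) (j - 1) 0 + 1)),
                  st.2.1, st.2.2)
          else
            (PySem.List.pySetD st.1 t (PySem.List.pySetD (PySem.List.pyGetD st.1 t []) j 0), st.2.1, st.2.2))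
        (dp, mx, sb) (PySem.List.pyRange 1 ((b.length : Int) + 1)) with hTAdef
    by_cases hgt : tl.foldl max 0 > mx
    · have hT2 : TA.2 = (tl.foldl max 0, PySem.Set.ofList [PySem.List.slice a (some (t - tl.foldl max 0)) (some t)]) := by
        rw [iSt, if_pos hgt]
      have hTA1 : TA = (TA.1, tl.foldl max 0, PySem.Set.ofList [PySem.List.slice a (some (t - tl.foldl max 0)) (some t)]) := by
        rw [← hT2]
      rw [if_pos hgt] at hresB
      rw [hTA1] at hresA
      exact ih (t+1) (by push_cast; omega) (by omega) TA.1 _ _ ((0:Int) :: tl) [t]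
        (by rw [iL]; exact hdplen)
        (fun kk h1 h2 => (iU kk (by omega) (by omega)).trans (hrows kk (by omega) h2))
        (by rw [show t + 1 - 1 = t by omega]; exact iRow.trans hrowB.symm)
        hrowNN hM0 rfl resA resB hresA hresB
    · by_cases heq : tl.foldl max 0 = mx ∧ 0 < mx
      · rw [if_neg hgt, if_pos heq] at hresB
        have hT2 : TA.2 = (mx, PySem.Set.add sb (PySem.List.slice a (some (t - mx)) (some t))) := by
          rw [iSt, if_neg hgt, if_pos heq]
        have hTA1 : TA = (TA.1, mx, PySem.Set.add sb (PySem.List.slice a (some (t - mx)) (some t))) := by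
          rw [← hT2]
        rw [hTA1] at hresA
        exact ih (t+1) (by push_cast; omega) (by omega) TA.1 mx _ ((0:Int) :: tl) (ends ++ [t])
          (by rw [iL]; exact hdplen)
          (fun kk h1 h2 => (iU kk (by omega) (by omega)).trans (hrows kk (by omega) h2))
          (by rw [show t + 1 - 1 = t by omega]; exact iRow.trans hrowB.symm)
          hrowNN hmx
          (by simp only [List.map_append, List.map_cons, List.map_nil]
              rw [PySem.Set.ofList_append_singleton, ← hsb])
          resA resB hresA hresB
      · rw [if_neg hgt, if_neg heq] at hresB
        have hT2 : TA.2 = (mx, sb) := by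
          rw [iSt, if_neg hgt, if_neg heq]
        have hTA1 : TA = (TA.1, mx, sb) := by rw [← hT2]
        rw [hTA1] at hresA
        exact ih (t+1) (by push_cast; omega) (by omega) TA.1 mx sb ((0:Int) :: tl) ends
          (by rw [iL]; exact hdplen)
          (fun kk h1 h2 => (iU kk (by omega) (by omega)).trans (hrows kk (by omega) h2))
          (by rw [show t + 1 - 1 = t by omega]; exact iRow.trans hrowB.symm)
          hrowNN hmx hsb resA resB hresA hresB

theorem pvDp0Row (a b : List Int) : ∀ kk : Int, 0 ≤ kk → kk ≤ (a.length : Int) →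
    PySem.List.pyGetD (List.map (fun _ => List.replicate (b.length + 1) (0:Int)) (List.range (a.length + 1))) kk [] =
      List.replicate (b.length + 1) 0 := by
  intro kk h0 h1
  rw [PySem.List.pyGetD_of_nonneg _ _ h0]
  exact PySem.List.getD_map_range _ _ _ _ (by omega)

-- A's value expressed through the rolling fold
theorem pvA2Roll (a b : List Int) :
    has_unique_longest_common_subarray (a, b) =
      ((PySem.Set.ofList ((pvRoll a b).2.2.map
          (fun e => PySem.List.slice a (some (e - (pvRoll a b).2.1)) (some e)))).length == 1) := by
  unfold has_unique_longest_common_subarray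
  dsimp only
  have h2 := (pvOuterLoop a b a.length 1 (by push_cast; omega) (by omega)
    (List.map (fun _ => List.replicate (b.length + 1) (0:Int)) (List.range (a.length + 1)))
    0 [] (List.replicate (b.length + 1) (0:Int)) []
    (by simp)
    (fun kk hk1 hk2 => pvDp0Row a b kk (by omega) hk2)
    (by rw [show (1:Int) - 1 = 0 by omega]; exact pvDp0Row a b 0 le_rfl (by omega))
    (fun w hw => by rw [List.eq_of_mem_replicate hw])
    le_rfl rfl _ _ rfl rfl).2
  rw [h2]
  rfl

-- ---------- the mathematical layer: longest common suffix lengths and windows ----------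

def pvLcs (a b : List Int) : Nat → Nat → Int
  | _, 0 => 0
  | 0, _+1 => 0
  | i+1, j+1 => if a.getD i 0 = b.getD j 0 then pvLcs a b i j + 1 else 0

def pvRowF (a b : List Int) : Nat → List Int
  | 0 => List.replicate (b.length + 1) 0
  | i+1 => pvNextRow (a.getD i 0) b (pvRowF a b i)

def pvRM (a b : List Int) (i : Nat) : Int := ((pvRowF a b i).tail).foldl max 0

def pvMX (a b : List Int) : Nat → Int
  | 0 => 0
  | i+1 => max (pvMX a b i) (pvRM a b (i+1))

def pvENDS (a b : List Int) (i : Nat) : List Int :=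
  if pvMX a b i = 0 then [] else
    (PySem.List.pyRange 1 ((i : Int) + 1)).filter (fun e => pvRM a b e.toNat == pvMX a b i)

theorem pvRowF_cons (a b : List Int) (i : Nat) : pvRowF a b i = 0 :: (pvRowF a b i).tail := by
  cases i with
  | zero => simp [pvRowF, List.replicate_succ]
  | succ i => rfl

theorem pvRowF_length (a b : List Int) (i : Nat) : (pvRowF a b i).length = b.length + 1 := by
  cases i with
  | zero => simp [pvRowF]
  | succ i => exact pvNextRow_length _ _ _

theorem pvRowF_getD (a b : List Int) (i : Nat) : ∀ j : Nat, j ≤ b.length →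
    (pvRowF a b i).getD j 0 = pvLcs a b i j := by
  induction i with
  | zero =>
    intro j hj
    cases j <;> simp [pvRowF, pvLcs, List.getD, List.getElem?_replicate] <;> split <;> rfl
  | succ i ih =>
    intro j hj
    cases j with
    | zero => rfl
    | succ j =>
      have hlen : j + 1 < (pvRowF a b (i+1)).length := by rw [pvRowF_length]; omega
      rw [List.getD_eq_getElem _ _ hlen]
      have hg := pvNextRow_get (a.getD i 0) b (pvRowF a b i) (j+1) (by omega) (by omega)
      refine hg.trans ?_
      have hc : ((j + 1 : Nat) : Int) - 1 = ((j : Nat) : Int) := by push_cast; omega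
      rw [hc, PySem.List.pyGetD_natCast, PySem.List.pyGetD_natCast, ih j (by omega)]
      simp only [pvLcs, beq_iff_eq]

theorem pvLcs_nonneg (a b : List Int) (i j : Nat) : 0 ≤ pvLcs a b i j := by
  induction i generalizing j with
  | zero => cases j <;> simp [pvLcs]
  | succ i ih =>
    cases j with
    | zero => simp [pvLcs]
    | succ j =>
      simp only [pvLcs]
      split
      · have := ih j; omega
      · omega

theorem pvLcs_le (a b : List Int) (i j : Nat) : pvLcs a b i j ≤ (i : Int) ∧ pvLcs a b i j ≤ (j : Int) := by
  induction i generalizing j with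
  | zero => cases j <;> simp [pvLcs] <;> positivity
  | succ i ih =>
    cases j with
    | zero => simp [pvLcs]; positivity
    | succ j =>
      simp only [pvLcs]
      split
      · have := ih j; push_cast; omega
      · constructor <;> positivity

theorem pvRM_nonneg (a b : List Int) (i : Nat) : 0 ≤ pvRM a b i :=
  (PySem.List.le_foldl_max _ 0).1

theorem pvLcs_le_RM (a b : List Int) (i j : Nat) (hj : j ≤ b.length) :
    pvLcs a b i j ≤ pvRM a b i := by
  cases j with
  | zero =>
    have h1 := pvRM_nonneg a b i
    have h2 : pvLcs a b i 0 = 0 := by cases i <;> rfl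
    omega
  | succ j =>
    have hlen : (pvRowF a b i).tail.length = b.length := by
      have := pvRowF_length a b i
      simp [List.length_tail, this]
    have hj' : j < (pvRowF a b i).tail.length := by omega
    have hgd : (pvRowF a b i).getD (j+1) 0 = (pvRowF a b i).tail[j] := by
      conv_lhs => rw [pvRowF_cons]
      rw [List.getD_cons_succ, List.getD_eq_getElem _ _ hj']
    rw [← pvRowF_getD a b i (j+1) hj, hgd]
    exact (PySem.List.le_foldl_max _ 0).2 _ (List.getElem_mem hj')

theorem pvRM_attained (a b : List Int) (i : Nat) :
    pvRM a b i = 0 ∨ ∃ j : Nat, j ≤ b.length ∧ pvRM a b i = pvLcs a b i j := by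
  have hm := PySem.List.max?_id_cons (0 : Int) (pvRowF a b i).tail
  have hmem := PySem.List.max?_mem hm
  rcases List.mem_cons.1 hmem with h | h
  · left; rw [pvRM]; omega
  · right
    rcases List.mem_iff_getElem.1 h with ⟨j, hj, hjv⟩
    have hlen : (pvRowF a b i).tail.length = b.length := by
      have := pvRowF_length a b i
      simp [List.length_tail, this]
    refine ⟨j + 1, by omega, ?_⟩
    rw [← pvRowF_getD a b i (j+1) (by omega)]
    conv_rhs => rw [pvRowF_cons]
    rw [List.getD_cons_succ, List.getD_eq_getElem _ _ hj, hjv]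
    rfl

theorem pvRM_le_MX (a b : List Int) (i' i : Nat) (h1 : 1 ≤ i') (h2 : i' ≤ i) :
    pvRM a b i' ≤ pvMX a b i := by
  induction i with
  | zero => omega
  | succ i ih =>
    rcases Nat.lt_or_ge i' (i+1) with h | h
    · have h2 := ih (by omega)
      simp only [pvMX]
      omega
    · have h2 : i' = i + 1 := by omega
      subst h2
      simp only [pvMX]
      omega

theorem pvMX_nonneg (a b : List Int) (i : Nat) : 0 ≤ pvMX a b i := by
  induction i with
  | zero => simp [pvMX]
  | succ i ih => simp only [pvMX]; omega

theorem pvMX_attained (a b : List Int) (i : Nat) :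
    pvMX a b i = 0 ∨ ∃ i' : Nat, 1 ≤ i' ∧ i' ≤ i ∧ pvMX a b i = pvRM a b i' := by
  induction i with
  | zero => left; rfl
  | succ i ih =>
    rcases le_total (pvRM a b (i+1)) (pvMX a b i) with h | h
    · have hmx : pvMX a b (i+1) = pvMX a b i := by simp only [pvMX]; omega
      rcases ih with h0 | ⟨i', h1, h2, h3⟩
      · left; omega
      · right; exact ⟨i', h1, by omega, by omega⟩
    · right
      refine ⟨i + 1, by omega, le_rfl, ?_⟩
      simp only [pvMX]
      omega

theorem pvSuffix (a b : List Int) : ∀ (L i j : Nat), L ≤ i → L ≤ j → i ≤ a.length → j ≤ b.length →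
    (((L : Int) ≤ pvLcs a b i j) ↔ (a.take i).drop (i - L) = (b.take j).drop (j - L)) := by
  intro L
  induction L with
  | zero =>
    intro i j _ _ him hjn
    constructor
    · intro _
      rw [Nat.sub_zero, Nat.sub_zero,
        List.drop_eq_nil_of_le (by rw [List.length_take]; omega),
        List.drop_eq_nil_of_le (by rw [List.length_take]; omega)]
    · intro _
      exact_mod_cast pvLcs_nonneg a b i j
  | succ L ih =>
    intro i j hLi hLj him hjn
    obtain ⟨i', rfl⟩ : ∃ i', i = i' + 1 := ⟨i - 1, by omega⟩
    obtain ⟨j', rfl⟩ : ∃ j', j = j' + 1 := ⟨j - 1, by omega⟩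
    have hia : i' < a.length := by omega
    have hjb : j' < b.length := by omega
    have hta : (a.take (i' + 1)).drop (i' + 1 - (L + 1)) =
        ((a.take i').drop (i' - L)).concat a[i'] := by
      rw [List.take_succ, List.getElem?_eq_getElem hia]
      rw [show i' + 1 - (L + 1) = i' - L by omega]
      rw [List.drop_append_of_le_length (by rw [List.length_take]; omega)]
      simp [List.concat_eq_append]
    have htb : (b.take (j' + 1)).drop (j' + 1 - (L + 1)) =
        ((b.take j').drop (j' - L)).concat b[j'] := by
      rw [List.take_succ, List.getElem?_eq_getElem hjb]
      rw [show j' + 1 - (L + 1) = j' - L by omega]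
      rw [List.drop_append_of_le_length (by rw [List.length_take]; omega)]
      simp [List.concat_eq_append]
    rw [hta, htb, List.concat_inj]
    have hgd : a.getD i' 0 = a[i'] := List.getD_eq_getElem a 0 hia
    have hgd' : b.getD j' 0 = b[j'] := List.getD_eq_getElem b 0 hjb
    by_cases h : a.getD i' 0 = b.getD j' 0
    · have hd : pvLcs a b (i' + 1) (j' + 1) = pvLcs a b i' j' + 1 := by
        simp only [pvLcs, if_pos h]
      rw [hd]
      have hih := ih i' j' (by omega) (by omega) (by omega) (by omega)
      constructor
      · intro hle
        exact ⟨hih.1 (by push_cast at hle ⊢; omega), by rw [← hgd, ← hgd', h]⟩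
      · intro ⟨h1, _⟩
        have := hih.2 h1
        push_cast
        omega
    · have hd : pvLcs a b (i' + 1) (j' + 1) = 0 := by
        simp only [pvLcs, if_neg h]
      rw [hd]
      constructor
      · intro hle
        exfalso
        push_cast at hle
        omega
      · intro ⟨_, h2⟩
        exfalso
        exact h (by rw [hgd, hgd', h2])

theorem pvWin_mem (xs : List Int) (L : Nat) (hL : L ≤ xs.length) (w : List Int) :
    (w ∈ pvWin xs (L : Int)) ↔ ∃ i : Nat, L ≤ i ∧ i ≤ xs.length ∧ w = (xs.take i).drop (i - L) := by
  unfold pvWin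
  rw [PySem.Set.mem_ofList, List.mem_map]
  constructor
  · rintro ⟨k, hk, rfl⟩
    rw [PySem.List.mem_pyRange_one] at hk
    refine ⟨k.toNat + L, by omega, by omega, ?_⟩
    have h1 : PySem.List.slice xs (some k) (some (k + L)) =
        ((xs.drop k.toNat).take ((k + L).toNat - k.toNat)) := by
      exact PySem.List.slice_toNat xs (by omega) (by omega)
    rw [h1, show (k + (L:Int)).toNat - k.toNat = L by omega]
    rw [List.drop_take, show k.toNat + L - (k.toNat + L - L) = L by omega,
      show k.toNat + L - L = k.toNat from by omega]
  · rintro ⟨i, hLi, hil, rfl⟩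
    refine ⟨((i - L : Nat) : Int), ?_, ?_⟩
    · rw [PySem.List.mem_pyRange_one]
      constructor
      · positivity
      · push_cast
        omega
    · rw [show ((i - L : Nat) : Int) + (L : Int) = ((i : Nat) : Int) by push_cast; omega]
      rw [PySem.List.slice_natCast]
      rw [List.drop_take, show i - (i - L) = L by omega]

theorem pvRollStep_char (a b cur : List Int) (mx : Int) (ends : List Int) (t : Int) :
    pvRollStep a b (cur, mx, ends) t =
      (pvNextRow (PySem.List.pyGetD a (t-1) 0) b cur,
       if ((pvNextRow (PySem.List.pyGetD a (t-1) 0) b cur).tail).foldl max 0 > mx then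
         (((pvNextRow (PySem.List.pyGetD a (t-1) 0) b cur).tail).foldl max 0, ([t] : List Int))
       else if ((pvNextRow (PySem.List.pyGetD a (t-1) 0) b cur).tail).foldl max 0 = mx ∧ 0 < mx then
         (mx, ends ++ [t])
       else (mx, ends)) := by
  have hrow : pvNextRow (PySem.List.pyGetD a (t-1) 0) b cur =
      (0:Int) :: List.map (fun q => if (PySem.List.pyGetD a (t - 1) 0 == q.2) = true
        then PySem.List.pyGetD cur q.1 0 + 1 else 0) (PySem.List.enumerate b) := rfl
  rw [hrow]
  simp only [pvRollStep, List.tail_cons, PySem.List.max?_id_cons, Option.getD_some]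
  by_cases hgt : (List.map (fun q => if (PySem.List.pyGetD a (t - 1) 0 == q.2) = true
      then PySem.List.pyGetD cur q.1 0 + 1 else 0) (PySem.List.enumerate b)).foldl max 0 > mx
  · rw [if_pos hgt, if_pos hgt]
  · rw [if_neg hgt, if_neg hgt]
    by_cases heq : (List.map (fun q => if (PySem.List.pyGetD a (t - 1) 0 == q.2) = true
        then PySem.List.pyGetD cur q.1 0 + 1 else 0) (PySem.List.enumerate b)).foldl max 0 = mx ∧ 0 < mx
    · rw [if_pos ((Bool.and_eq_true _ _).mpr
        ⟨beq_iff_eq.mpr heq.1, decide_eq_true (by omega)⟩), if_pos heq]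
    · rw [if_neg (fun hb => heq
        ⟨beq_iff_eq.mp ((Bool.and_eq_true _ _).mp hb).1, by
          have := of_decide_eq_true ((Bool.and_eq_true _ _).mp hb).2
          omega⟩), if_neg heq]

-- the rolling fold computes (row, max, ends)
theorem pvRoll_eq (a b : List Int) :
    pvRoll a b = (pvRowF a b a.length, pvMX a b a.length, pvENDS a b a.length) := by
  suffices H : ∀ N : Nat,
      (PySem.List.pyRange 1 ((N : Int) + 1)).foldl (pvRollStep a b)
        (List.replicate (b.length + 1) 0, (0 : Int), ([] : List Int)) =
      (pvRowF a b N, pvMX a b N, pvENDS a b N) from H a.length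
  intro N
  induction N with
  | zero =>
    rw [show ((0 : Nat) : Int) + 1 = 1 by norm_num, PySem.List.pyRange_one_eq_nil le_rfl]
    simp [pvRowF, pvMX, pvENDS]
  | succ N ih =>
    have hcast : ((N + 1 : Nat) : Int) + 1 = ((N : Int) + 1) + 1 := by push_cast; omega
    rw [hcast, PySem.List.pyRange_one_succ_right (by omega), List.foldl_append, ih,
      List.foldl_cons, List.foldl_nil, pvRollStep_char]
    have hx : PySem.List.pyGetD a (((N : Int) + 1) - 1) 0 = a.getD N 0 := by
      rw [show ((N : Int) + 1) - 1 = ((N : Nat) : Int) by omega, PySem.List.pyGetD_natCast]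
    rw [hx]
    have hrow : pvNextRow (a.getD N 0) b (pvRowF a b N) = pvRowF a b (N + 1) := rfl
    rw [hrow]
    have hr : (pvRowF a b (N + 1)).tail.foldl max 0 = pvRM a b (N + 1) := rfl
    rw [hr]
    have hMN := pvMX_nonneg a b N
    have hRMnn := pvRM_nonneg a b (N + 1)
    have hsplit : PySem.List.pyRange 1 (((N + 1 : Nat) : Int) + 1) =
        PySem.List.pyRange 1 ((N : Int) + 1) ++ [((N : Int) + 1)] := by
      rw [hcast]
      exact PySem.List.pyRange_one_succ_right (by omega)
    by_cases hgt : pvRM a b (N + 1) > pvMX a b N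
    · rw [if_pos hgt]
      have hMX1 : pvMX a b (N + 1) = pvRM a b (N + 1) := by simp only [pvMX]; omega
      have hE : pvENDS a b (N + 1) = [((N : Int) + 1)] := by
        unfold pvENDS
        rw [if_neg (by omega), hsplit, List.filter_append]
        rw [show (PySem.List.pyRange 1 ((N : Int) + 1)).filter
              (fun e => pvRM a b e.toNat == pvMX a b (N + 1)) = [] from
            List.filter_eq_nil_iff.2 (by
              intro e he
              rw [PySem.List.mem_pyRange_one] at he
              have hle := pvRM_le_MX a b e.toNat N (by omega) (by omega)
              simp only [beq_iff_eq]
              omega)]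
        simp only [List.filter_cons, List.filter_nil, List.nil_append]
        rw [if_pos (by
          rw [show ((N : Int) + 1).toNat = N + 1 by omega]
          simp only [beq_iff_eq]
          omega)]
      rw [hE, hMX1]
    · rw [if_neg hgt]
      have hMX1 : pvMX a b (N + 1) = pvMX a b N := by simp only [pvMX]; omega
      by_cases heq : pvRM a b (N + 1) = pvMX a b N ∧ 0 < pvMX a b N
      · rw [if_pos heq]
        have hE : pvENDS a b (N + 1) = pvENDS a b N ++ [((N : Int) + 1)] := by
          unfold pvENDS
          rw [if_neg (by omega), if_neg (by omega), hsplit, List.filter_append, hMX1]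
          simp only [List.filter_cons, List.filter_nil]
          rw [if_pos (by
            rw [show ((N : Int) + 1).toNat = N + 1 by omega]
            simp only [beq_iff_eq]
            omega)]
        rw [hE, hMX1]
      · rw [if_neg heq]
        by_cases h0 : pvMX a b N = 0
        · have hr0 : pvRM a b (N + 1) = 0 := by omega
          have hE : pvENDS a b (N + 1) = pvENDS a b N := by
            unfold pvENDS
            rw [if_pos (by omega), if_pos (by omega)]
          rw [hE, hMX1]
        · have hlt : pvRM a b (N + 1) < pvMX a b N := by
            rcases lt_or_eq_of_le (le_of_not_gt hgt) with h | h
            · exact h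
            · exact absurd ⟨h, by omega⟩ heq
          have hE : pvENDS a b (N + 1) = pvENDS a b N := by
            unfold pvENDS
            rw [if_neg (by omega), if_neg (by omega), hsplit, List.filter_append, hMX1]
            simp only [List.filter_cons, List.filter_nil]
            rw [if_neg (by
              rw [show ((N : Int) + 1).toNat = N + 1 by omega]
              simp only [beq_iff_eq]
              omega)]
            simp
          rw [hE, hMX1]

theorem pvCommon_ne_nil_iff (a b : List Int) (L : Int) (h1 : 1 ≤ L)
    (h2 : L ≤ min (a.length : Int) (b.length : Int)) :
    (pvCommon a b L ≠ [] ↔ L ≤ pvMX a b a.length) := by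
  obtain ⟨hma, hmb⟩ := le_min_iff.mp h2
  have hLn : L = ((L.toNat : Nat) : Int) := by omega
  constructor
  · intro hne
    obtain ⟨w, hw⟩ := List.exists_mem_of_ne_nil _ hne
    unfold pvCommon at hw
    rw [PySem.Set.mem_inter] at hw
    obtain ⟨hwa, hwb⟩ := hw
    rw [hLn, pvWin_mem a L.toNat (by omega) w] at hwa
    rw [hLn, pvWin_mem b L.toNat (by omega) w] at hwb
    obtain ⟨i, hLi, him, hwi⟩ := hwa
    obtain ⟨j, hLj, hjn, hwj⟩ := hwb
    have heqw : (a.take i).drop (i - L.toNat) = (b.take j).drop (j - L.toNat) := by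
      rw [← hwi, ← hwj]
    have hs := (pvSuffix a b L.toNat i j hLi hLj him hjn).2 heqw
    have h1 := pvLcs_le_RM a b i j hjn
    have h2' := pvRM_le_MX a b i a.length (by omega) him
    omega
  · intro hle
    have hMpos : 0 < pvMX a b a.length := by omega
    rcases pvMX_attained a b a.length with h0 | ⟨i', hi1, hi2, hi3⟩
    · omega
    rcases pvRM_attained a b i' with hr0 | ⟨j, hj, hrj⟩
    · omega
    have hMlcs : pvMX a b a.length = pvLcs a b i' j := by rw [hi3, hrj]
    have hlle := pvLcs_le a b i' j
    have hLi : L.toNat ≤ i' := by omega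
    have hLj : L.toNat ≤ j := by omega
    have hsuf := (pvSuffix a b L.toNat i' j hLi hLj hi2 hj).1 (by omega)
    apply List.ne_nil_of_mem (a := (a.take i').drop (i' - L.toNat))
    unfold pvCommon
    rw [PySem.Set.mem_inter]
    constructor
    · rw [hLn, pvWin_mem a L.toNat (by omega)]
      exact ⟨i', hLi, hi2, rfl⟩
    · rw [hLn, pvWin_mem b L.toNat (by omega)]
      exact ⟨j, hLj, hj, hsuf⟩

theorem pvMX_le_min (a b : List Int) :
    pvMX a b a.length ≤ min (a.length : Int) (b.length : Int) := by
  rcases pvMX_attained a b a.length with h0 | ⟨i', hi1, hi2, hi3⟩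
  · rw [h0]
    exact le_min (by positivity) (by positivity)
  · rcases pvRM_attained a b i' with hr0 | ⟨j, hj, hrj⟩
    · rw [hi3, hr0]
      exact le_min (by positivity) (by positivity)
    · rw [hi3, hrj]
      have hle := pvLcs_le a b i' j
      exact le_min (le_trans hle.1 (by exact_mod_cast hi2)) (le_trans hle.2 (by exact_mod_cast hj))

theorem pvBSearchGo_eq (a b : List Int) : ∀ (fuel : Nat) (lo hi : Int), (hi - lo).toNat ≤ fuel →
    0 ≤ lo → lo ≤ pvMX a b a.length → pvMX a b a.length ≤ hi →
    hi ≤ min (a.length : Int) (b.length : Int) →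
    pvBSearchGo a b fuel lo hi = pvMX a b a.length := by
  intro fuel
  induction fuel with
  | zero =>
    intro lo hi hf h0 h1 h2 h3
    simp only [pvBSearchGo]
    omega
  | succ fuel ih =>
    intro lo hi hf h0 h1 h2 h3
    simp only [pvBSearchGo]
    by_cases hlh : lo < hi
    · rw [if_pos hlh]
      have hfd : PySem.Int.floordiv (lo + hi + 1) 2 = (lo + hi + 1) / 2 :=
        PySem.Int.floordiv_eq_ediv_of_pos (by omega)
      have hmb : lo < PySem.Int.floordiv (lo + hi + 1) 2 ∧
          PySem.Int.floordiv (lo + hi + 1) 2 ≤ hi := by rw [hfd]; constructor <;> omega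
      by_cases hc : pvCommon a b (PySem.Int.floordiv (lo + hi + 1) 2) ≠ []
      · rw [if_pos hc]
        have hmle : PySem.Int.floordiv (lo + hi + 1) 2 ≤ pvMX a b a.length :=
          (pvCommon_ne_nil_iff a b _ (by omega) (by omega)).1 hc
        exact ih _ hi (by omega) (by omega) hmle h2 h3
      · rw [if_neg hc]
        have hnot : ¬ (PySem.Int.floordiv (lo + hi + 1) 2 ≤ pvMX a b a.length) := fun hle =>
          hc ((pvCommon_ne_nil_iff a b _ (by omega) (by omega)).2 hle)
        exact ih lo _ (by omega) h0 h1 (by omega) (by omega)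
    · rw [if_neg hlh]
      omega

theorem pvBSearch_eq (a b : List Int) (lo hi : Int) (h0 : 0 ≤ lo)
    (h1 : lo ≤ pvMX a b a.length) (h2 : pvMX a b a.length ≤ hi)
    (h3 : hi ≤ min (a.length : Int) (b.length : Int)) :
    pvBSearch a b lo hi = pvMX a b a.length :=
  pvBSearchGo_eq a b (hi - lo).toNat lo hi le_rfl h0 h1 h2 h3

theorem pvSliceWin (xs : List Int) (e M : Int) (h0 : 0 ≤ M) (hMe : M ≤ e) :
    PySem.List.slice xs (some (e - M)) (some e) = (xs.take e.toNat).drop (e.toNat - M.toNat) := by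
  rw [PySem.List.slice_toNat xs (by omega) (by omega),
    show (e - M).toNat = e.toNat - M.toNat by omega, List.drop_take]

-- membership equivalence between A's subarray set and common(MX)
theorem pvEnds_common (a b : List Int) (hMX : 0 < pvMX a b a.length) (w : List Int) :
    (w ∈ PySem.Set.ofList ((pvENDS a b a.length).map
        (fun e => PySem.List.slice a (some (e - pvMX a b a.length)) (some e)))) ↔
      w ∈ pvCommon a b (pvMX a b a.length) := by
  have hMle := pvMX_le_min a b
  obtain ⟨hma, hmb⟩ := le_min_iff.mp hMle
  have hcast : pvMX a b a.length = (((pvMX a b a.length).toNat : Nat) : Int) := by omega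
  constructor
  · intro hw
    rw [PySem.Set.mem_ofList, List.mem_map] at hw
    obtain ⟨e, he, rfl⟩ := hw
    unfold pvENDS at he
    rw [if_neg (by omega)] at he
    rw [List.mem_filter, PySem.List.mem_pyRange_one] at he
    obtain ⟨⟨he1, he2⟩, hbeq⟩ := he
    rw [beq_iff_eq] at hbeq
    rcases pvRM_attained a b e.toNat with h0 | ⟨j, hj, hrj⟩
    · omega
    have hMlcs : pvMX a b a.length = pvLcs a b e.toNat j := by rw [← hbeq, hrj]
    have hlle := pvLcs_le a b e.toNat j
    have hLi : (pvMX a b a.length).toNat ≤ e.toNat := by omega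
    have hLj : (pvMX a b a.length).toNat ≤ j := by omega
    have him : e.toNat ≤ a.length := by omega
    have hsuf := (pvSuffix a b (pvMX a b a.length).toNat e.toNat j hLi hLj him hj).1 (by omega)
    have hslice : PySem.List.slice a (some (e - pvMX a b a.length)) (some e) =
        (a.take e.toNat).drop (e.toNat - (pvMX a b a.length).toNat) :=
      pvSliceWin a e (pvMX a b a.length) (by omega) (by omega)
    rw [hslice]
    unfold pvCommon
    rw [PySem.Set.mem_inter]
    constructor
    · rw [hcast, pvWin_mem a (pvMX a b a.length).toNat (by omega)]
      exact ⟨e.toNat, hLi, him, rfl⟩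
    · rw [hcast, pvWin_mem b (pvMX a b a.length).toNat (by omega)]
      exact ⟨j, hLj, hj, hsuf⟩
  · intro hw
    unfold pvCommon at hw
    rw [PySem.Set.mem_inter] at hw
    obtain ⟨hwa, hwb⟩ := hw
    rw [hcast, pvWin_mem a (pvMX a b a.length).toNat (by omega)] at hwa
    rw [hcast, pvWin_mem b (pvMX a b a.length).toNat (by omega)] at hwb
    obtain ⟨i, hLi, him, hwi⟩ := hwa
    obtain ⟨j, hLj, hjn, hwj⟩ := hwb
    have heqw : (a.take i).drop (i - (pvMX a b a.length).toNat) =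
        (b.take j).drop (j - (pvMX a b a.length).toNat) := by rw [← hwi, ← hwj]
    have hsuf := (pvSuffix a b (pvMX a b a.length).toNat i j hLi hLj him hjn).2 heqw
    have h1 := pvLcs_le_RM a b i j hjn
    have h2 := pvRM_le_MX a b i a.length (by omega) him
    have hRM : pvRM a b i = pvMX a b a.length := by omega
    rw [PySem.Set.mem_ofList, List.mem_map]
    refine ⟨((i : Nat) : Int), ?_, ?_⟩
    · unfold pvENDS
      rw [if_neg (by omega)]
      rw [List.mem_filter, PySem.List.mem_pyRange_one]
      refine ⟨⟨by omega, by omega⟩, ?_⟩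
      simp only [beq_iff_eq]
      rw [show ((i : Nat) : Int).toNat = i by omega]
      exact hRM
    · rw [hwi]
      rw [pvSliceWin a ((i : Nat) : Int) (pvMX a b a.length) (by omega) (by
          rw [hcast]; exact_mod_cast hLi), Int.toNat_natCast]

theorem pvMainEq (a b : List Int) :
    has_unique_longest_common_subarray (a, b) = has_unique_longest_common_subarray_alt (a, b) := by
  rw [pvA2Roll, pvRoll_eq]
  unfold has_unique_longest_common_subarray_alt
  dsimp only
  have hbs : pvBSearch a b 0 (min (a.length : Int) (b.length : Int)) = pvMX a b a.length :=
    pvBSearch_eq a b 0 (min (a.length : Int) (b.length : Int)) le_rfl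
      (pvMX_nonneg a b a.length) (pvMX_le_min a b) le_rfl
  rw [hbs]
  by_cases hM : pvMX a b a.length = 0
  · have hE : pvENDS a b a.length = [] := by
      unfold pvENDS
      rw [if_pos hM]
    rw [hE, hM]
    rfl
  · have hpos : 0 < pvMX a b a.length := lt_of_le_of_ne (pvMX_nonneg _ _ _) (Ne.symm hM)
    have hperm : (PySem.Set.ofList ((pvENDS a b a.length).map
        (fun e => PySem.List.slice a (some (e - pvMX a b a.length)) (some e)))).Perm
          (pvCommon a b (pvMX a b a.length)) := by
      rw [List.perm_ext_iff_of_nodup (PySem.Set.nodup_ofList _) (by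
        unfold pvCommon
        exact PySem.Set.nodup_inter _ _ (by unfold pvWin; exact PySem.Set.nodup_ofList _))]
      exact fun w => pvEnds_common a b hpos w
    rw [hperm.length_eq, show (decide (pvMX a b a.length > 0)) = true from decide_eq_true hpos,
      Bool.true_and]

theorem pvSpecAll (input : List Int × List Int) :
    Spec_has_unique_longest_common_subarray input (has_unique_longest_common_subarray input) := by
  unfold Spec_has_unique_longest_common_subarray
  obtain ⟨a, b⟩ := input
  exact pvMainEq a b

-- ===== VERDICT (by name: the statement is the Claim_ definition above) =====
theorem has_unique_longest_common_subarray_spec : Claim_equal_has_unique_longest_common_subarray :=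
  fun input _ => pvSpecAll input
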